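-- pv_equiv track=rewrite | github.com/compilerai/counter | superopt/utils/eq_read_log.py | get_all_passing_failing_logfiles
-- ===== SOURCE A (Python) =====
-- def get_all_passing_failing_logfiles(results_map):
--   log_files_passing = []
--   log_files_failing = []
--   for key in results_map:
--     if results_map[key]['pass_status'].startswith("passed"):
--       log_files_passing.append(results_map[key]['log-file'])
--     else:
--       log_files_failing.append(results_map[key]['log-file'])
--   return (log_files_passing, log_files_failing)
-- ===== SOURCE B (Python) =====
-- def get_all_passing_failing_logfiles(results_map):
--   vals = sorted(results_map.values(),
--                 key=lambda v: not v['pass_status'].startswith("passed"))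
--   logs = [v['log-file'] for v in vals]
--   k = sum(1 for v in vals if v['pass_status'].startswith("passed"))
--   return (logs[:k], logs[k:])
-- ===== Notes on version B (the rewrite author's own statement) =====
-- stated objective: alternative
-- what changed: Instead of one partitioning loop, B stably sorts the values by pass-status (passing first), projects the log-file column, and splits that list at the passing count.
import Mathlib
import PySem

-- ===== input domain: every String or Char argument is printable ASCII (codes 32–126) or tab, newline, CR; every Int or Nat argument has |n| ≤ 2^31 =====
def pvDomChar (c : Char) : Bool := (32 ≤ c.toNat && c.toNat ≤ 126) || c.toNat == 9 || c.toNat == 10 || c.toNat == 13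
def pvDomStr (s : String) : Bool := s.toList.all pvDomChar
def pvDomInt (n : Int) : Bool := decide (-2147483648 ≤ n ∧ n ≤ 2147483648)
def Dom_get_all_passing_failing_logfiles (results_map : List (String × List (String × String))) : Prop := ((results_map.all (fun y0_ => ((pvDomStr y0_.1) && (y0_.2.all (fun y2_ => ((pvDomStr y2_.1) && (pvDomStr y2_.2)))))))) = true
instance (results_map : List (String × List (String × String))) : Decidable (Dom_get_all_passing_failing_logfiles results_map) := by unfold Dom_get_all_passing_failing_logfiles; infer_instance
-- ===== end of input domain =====

-- B replaces A's one-pass partitioning loop by a different algorithm: stably sort the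
-- values by pass-status (passing first), project the log-file column, split at the
-- passing count ("alternative", not claimed faster).

-- ===== PORT A =====
-- A: iterate over the dict's keys, index the dict at each key, test pass_status, append log-file.
def get_all_passing_failing_logfiles (results_map : List (String × List (String × String))) : List String × List String :=
  let d := PySem.Dict.mk results_map
  d.keys.foldl
    (fun acc key =>
      let v := PySem.Dict.mk ((d.get? key).getD [])
      if PySem.Str.startswith ((v.get? "pass_status").getD "") "passed" then
        (acc.1 ++ [(v.get? "log-file").getD ""], acc.2)
      else
        (acc.1, acc.2 ++ [(v.get? "log-file").getD ""]))
    ([], [])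

-- ===== PORT B =====
-- B: stable sort of the values by the bool key `not startswith` (ported as Nat 0/1,
-- False=0 < True=1), project log-file, split at the passing count with slices.
def get_all_passing_failing_logfiles_alt (results_map : List (String × List (String × String))) : List String × List String :=
  let vals := (PySem.Dict.mk results_map).values
  let svals := PySem.List.sorted vals
      (fun v => if PySem.Str.startswith (((PySem.Dict.mk v).get? "pass_status").getD "") "passed" then (0 : Nat) else 1)
  let logs := svals.map (fun v => ((PySem.Dict.mk v).get? "log-file").getD "")
  let k : Int := (svals.map
      (fun v => if PySem.Str.startswith (((PySem.Dict.mk v).get? "pass_status").getD "") "passed" then (1 : Int) else 0)).sum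
  (PySem.List.slice logs none (some k), PySem.List.slice logs (some k) none)

-- ===== PRECONDITION & SPEC =====
-- Pre_ excludes association lists with duplicate keys (outer or inner) — those do not represent a
-- Python dict, whose keys are unique — and values lacking 'pass_status' or 'log-file', on which
-- the Python A raises KeyError.
def Pre_get_all_passing_failing_logfiles (results_map : List (String × List (String × String))) : Prop :=
  (results_map.map Prod.fst).Nodup ∧
  ∀ p ∈ results_map,
    (p.2.map Prod.fst).Nodup ∧
    (((PySem.Dict.mk p.2).get? "pass_status").isSome = true) ∧
    (((PySem.Dict.mk p.2).get? "log-file").isSome = true)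
instance (results_map : List (String × List (String × String))) : Decidable (Pre_get_all_passing_failing_logfiles results_map) := by unfold Pre_get_all_passing_failing_logfiles; infer_instance

def pvWitness_get_all_passing_failing_logfiles : (List (String × List (String × String))) :=
  [("k1", [("pass_status", "passed"), ("log-file", "a.log")]),
   ("k2", [("pass_status", "failed: seed"), ("log-file", "b.log")])]

def Spec_get_all_passing_failing_logfiles (results_map : List (String × List (String × String))) (out : List String × List String) : Prop := out = get_all_passing_failing_logfiles_alt results_map
instance (results_map : List (String × List (String × String))) (out : List String × List String) : Decidable (Spec_get_all_passing_failing_logfiles results_map out) := by unfold Spec_get_all_passing_failing_logfiles; infer_instance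

-- ===== CLAIM (what is proved, stated in full; the proofs are below) =====
def Claim_equal_get_all_passing_failing_logfiles : Prop := ∀ (results_map : List (String × List (String × String))), Dom_get_all_passing_failing_logfiles results_map → Pre_get_all_passing_failing_logfiles results_map → Spec_get_all_passing_failing_logfiles results_map (get_all_passing_failing_logfiles results_map)

-- ===== LEMMAS AND PROOFS =====

-- insertBy walks past a prefix it does not go before and lands before the suffix.
theorem pv_insertBy_between {α : Type} (before : α → α → Bool) (x : α) (P F : List α)
    (hP : ∀ p ∈ P, before x p = false) (hF : ∀ f ∈ F, before x f = true) :
    PySem.List.insertBy before x (P ++ F) = P ++ x :: F := by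
  induction P with
  | nil =>
    cases F with
    | nil => simp [PySem.List.insertBy]
    | cons f fs => simp [PySem.List.insertBy, hF f (by simp)]
  | cons p P' ih =>
    have hp : before x p = false := hP p (by simp)
    simp only [List.cons_append, PySem.List.insertBy, hp, Bool.false_eq_true, if_false]
    exact congrArg (p :: ·) (ih (fun q hq => hP q (by simp [hq])))

-- The insertion-sort fold with a 0/1 key is the stable two-way partition.
theorem pv_foldl_insert_partition {α : Type} (key : α → Nat) (hk : ∀ a, key a ≤ 1)
    (xs : List α) : ∀ (P F : List α), (∀ p ∈ P, key p = 0) → (∀ f ∈ F, key f = 1) →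
    xs.foldl (fun acc x => PySem.List.insertBy (fun a b => decide (key a < key b)) x acc) (P ++ F)
      = (P ++ xs.filter (fun x => key x == 0)) ++ (F ++ xs.filter (fun x => key x == 1)) := by
  induction xs with
  | nil => intro P F _ _; simp
  | cons x xs ih =>
    intro P F hP hF
    by_cases hx : key x = 0
    · have h1 : PySem.List.insertBy (fun a b => decide (key a < key b)) x (P ++ F) = P ++ x :: F :=
        pv_insertBy_between _ x P F
          (fun p hp => by simp [hx, hP p hp])
          (fun f hf => by simp [hx, hF f hf])
      have h2 := ih (P ++ [x]) F
        (by intro p hp; rcases List.mem_append.mp hp with h | h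
            · exact hP p h
            · simp at h; simp [h, hx]) hF
      rw [List.foldl_cons, h1]
      have hPxF : P ++ x :: F = (P ++ [x]) ++ F := by simp
      rw [hPxF, h2]
      simp [hx]
    · have hx1 : key x = 1 := by have := hk x; omega
      have h1 : PySem.List.insertBy (fun a b => decide (key a < key b)) x (P ++ F)
          = (P ++ F) ++ [x] := by
        apply PySem.List.insertBy_of_forall_not_before
        intro y hy
        have : key y ≤ 1 := hk y
        simp [hx1]; omega
      have h2 := ih P (F ++ [x]) hP
        (by intro f hf; rcases List.mem_append.mp hf with h | h
            · exact hF f h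
            · simp at h; simp [h, hx1])
      rw [List.foldl_cons, h1]
      have : (P ++ F) ++ [x] = P ++ (F ++ [x]) := by simp
      rw [this, h2]
      simp [hx1]

-- Stable sort by a 0/1 key = (key-0 elements in order) ++ (key-1 elements in order).
theorem pv_sorted_bool {α : Type} (key : α → Nat) (hk : ∀ a, key a ≤ 1) (xs : List α) :
    PySem.List.sorted xs key
      = xs.filter (fun x => key x == 0) ++ xs.filter (fun x => key x == 1) := by
  rw [PySem.List.sorted_eq_foldl_insertBy]
  have := pv_foldl_insert_partition key hk xs [] [] (by simp) (by simp)
  simpa using this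

-- A partitioning fold over pairs equals the two filter/map passes.
theorem pv_pairfold {α β : Type} (p : α → Bool) (f : α → β) (l : List α) (a b : List β) :
    l.foldl
      (fun acc x => if p x then (acc.1 ++ [f x], acc.2) else (acc.1, acc.2 ++ [f x]))
      (a, b)
    = (a ++ (l.filter p).map f, b ++ (l.filter (fun x => !p x)).map f) := by
  induction l generalizing a b with
  | nil => simp
  | cons x xs ih =>
    by_cases h : p x = true <;> simp [List.foldl_cons, h, ih]

theorem get_all_passing_failing_logfiles_spec_aux
    (m : List (String × List (String × String)))
    (hnd : (m.map Prod.fst).Nodup) :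
    get_all_passing_failing_logfiles m = get_all_passing_failing_logfiles_alt m := by
  have hkeys : (PySem.Dict.mk m).keys = m.map Prod.fst := rfl
  have hvals : (PySem.Dict.mk m).values = m.map Prod.snd := rfl
  set p : List (String × String) → Bool :=
    fun v => PySem.Str.startswith (((PySem.Dict.mk v).get? "pass_status").getD "") "passed" with hp
  set f : List (String × String) → String :=
    fun v => ((PySem.Dict.mk v).get? "log-file").getD "" with hf
  -- A reduces to the filter/map pair over the values.
  have hA : get_all_passing_failing_logfiles m
      = (((m.map Prod.snd).filter p).map f, ((m.map Prod.snd).filter (fun v => !p v)).map f) := by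
    simp only [get_all_passing_failing_logfiles, hkeys]
    rw [List.foldl_map]
    rw [PySem.List.foldl_congr_mem
      (g := fun (acc : List String × List String) (q : String × List (String × String)) =>
        if p q.2 then (acc.1 ++ [f q.2], acc.2) else (acc.1, acc.2 ++ [f q.2]))
      (h := by
        intro acc q hq
        have hget : (PySem.Dict.mk m).get? q.1 = some q.2 :=
          PySem.Dict.get?_of_mem_items (d := PySem.Dict.mk m) (k := q.1) (v := q.2) hq hnd
        simp [hget, hp, hf])]
    have := pv_pairfold (fun q : String × List (String × String) => p q.2)
      (fun q => f q.2) m [] []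
    simp only [this, List.nil_append]
    simp [List.filter_map, List.map_map, Function.comp_def]
  -- B reduces to the same pair.
  have hkey1 : ∀ v : List (String × String), (if p v then (0:Nat) else 1) ≤ 1 := by
    intro v; split <;> omega
  have hsort := pv_sorted_bool (fun v => if p v then (0:Nat) else 1) hkey1 (m.map Prod.snd)
  simp only [get_all_passing_failing_logfiles_alt, hvals]
  rw [hA]
  simp only [← hf]
  rw [hsort]
  have hfilter0 : ((m.map Prod.snd).filter (fun x => (if p x then (0:Nat) else 1) == 0))
      = (m.map Prod.snd).filter p := by
    apply List.filter_congr; intro x _; by_cases h : p x <;> simp [h]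
  have hfilter1 : ((m.map Prod.snd).filter (fun x => (if p x then (0:Nat) else 1) == 1))
      = (m.map Prod.snd).filter (fun v => !p v) := by
    apply List.filter_congr; intro x _; by_cases h : p x <;> simp [h]
  rw [hfilter0, hfilter1]
  -- the Int count equals the length of the passing prefix
  set L0 := ((m.map Prod.snd).filter p) with hL0
  set L1 := ((m.map Prod.snd).filter (fun v => !p v)) with hL1
  have hsum : ((L0 ++ L1).map (fun v => if p v then (1:Int) else 0)).sum
      = ((L0.length : Nat) : Int) := by
    have e0 : ∀ v ∈ L0, p v = true := by intro v hv; exact (List.mem_filter.mp hv).2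
    have e1 : ∀ v ∈ L1, p v = false := by
      intro v hv; have := (List.mem_filter.mp hv).2; simpa using this
    rw [List.map_append, List.sum_append]
    have h0 : (L0.map (fun v => if p v then (1:Int) else 0)) = L0.map (fun _ => (1:Int)) := by
      apply List.map_congr_left; intro v hv; simp [e0 v hv]
    have h1 : (L1.map (fun v => if p v then (1:Int) else 0)) = L1.map (fun _ => (0:Int)) := by
      apply List.map_congr_left; intro v hv; simp [e1 v hv]
    rw [h0, h1]
    simp [List.map_const']
  rw [hsum]
  rw [List.map_append]
  rw [PySem.List.slice_to_natCast, PySem.List.slice_from_natCast]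
  rw [List.take_left' (by simp), List.drop_left' (by simp)]

-- ===== VERDICT (by name: the statement is the Claim_ definition above) =====
theorem get_all_passing_failing_logfiles_spec : Claim_equal_get_all_passing_failing_logfiles := by
  intro m _ hpre
  exact get_all_passing_failing_logfiles_spec_aux m hpre.1
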